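-- pv_equiv track=rewrite | github.com/NikolaosSopiadis/linux_docs_llm | data/filter.py | wrap_code_blocks
-- ===== SOURCE A (Python) =====
-- def wrap_code_blocks(body_text: str) -> str:
--     """Wrap consecutive lines beginning with a space into <code>...</code>."""
--     out_lines, in_code = [], False
--     for line in body_text.splitlines(True):
--         if line.startswith(" "):
--             if not in_code:
--                 out_lines.append("<code>\n")
--                 in_code = True
--             out_lines.append(line[1:])  # strip one leading space
--         else:
--             if in_code:
--                 out_lines.append("</code>\n")
--                 in_code = False
--             out_lines.append(line)
--     if in_code:
--         out_lines.append("</code>\n")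
--     return "".join(out_lines)
-- ===== SOURCE B (Python) =====
-- def wrap_code_blocks(body_text: str) -> str:
--     """Wrap consecutive lines beginning with a space into <code>...</code>."""
--     lines = body_text.splitlines(True)
--     pieces = []
--     i, n = 0, len(lines)
--     while i < n:
--         flag = lines[i].startswith(" ")
--         j = i
--         while j < n and lines[j].startswith(" ") == flag:
--             j += 1
--         if flag:
--             pieces.append("<code>\n")
--             pieces.extend(line[1:] for line in lines[i:j])
--             pieces.append("</code>\n")
--         else:
--             pieces.extend(lines[i:j])
--         i = j
--     return "".join(pieces)
-- ===== Notes on version B (the rewrite author's own statement) =====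
-- stated objective: alternative
-- what changed: Replaces A's per-line in_code boolean state machine with a group-first traversal: the lines are cut into maximal runs whose leading-space flag agrees, and each run is emitted at once (wrapped in code tags if it is a space-indented run).
import Mathlib
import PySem

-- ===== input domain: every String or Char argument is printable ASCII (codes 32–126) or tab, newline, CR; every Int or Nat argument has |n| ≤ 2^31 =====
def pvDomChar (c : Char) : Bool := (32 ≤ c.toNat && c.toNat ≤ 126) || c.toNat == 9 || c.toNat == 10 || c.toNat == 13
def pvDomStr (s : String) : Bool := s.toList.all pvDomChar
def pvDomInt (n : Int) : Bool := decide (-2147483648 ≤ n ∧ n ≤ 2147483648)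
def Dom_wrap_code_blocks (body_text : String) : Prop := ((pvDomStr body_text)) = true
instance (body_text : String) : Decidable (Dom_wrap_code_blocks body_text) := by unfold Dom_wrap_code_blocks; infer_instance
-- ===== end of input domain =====

-- B replaces A's per-line in_code state machine by a group-first traversal (maximal runs of
-- same space-prefix flag, each run emitted at once); alternative decomposition, same cost.

-- ===== PORT A =====

-- hand port of str.splitlines(keepends=True), exact on the domain's line breaks '\n', '\r', '\r\n'
def pvSlkAux : List Char → List Char → List (List Char)
  | [], acc => if acc = [] then [] else [acc.reverse]
  | '\r' :: '\n' :: cs, acc => (acc.reverse ++ ['\r', '\n']) :: pvSlkAux cs []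
  | c :: cs, acc =>
    if c = '\n' then (acc.reverse ++ ['\n']) :: pvSlkAux cs []
    else if c = '\r' then (acc.reverse ++ ['\r']) :: pvSlkAux cs []
    else pvSlkAux cs (c :: acc)

def pvSplitlinesKeep (cs : List Char) : List (List Char) := pvSlkAux cs []

def pvOpenTag : List Char := "<code>\n".toList
def pvCloseTag : List Char := "</code>\n".toList

-- A: fold over the lines with the (out_lines, in_code) state, then the trailing close tag
def wrap_code_blocks (body_text : String) : String :=
  let st := (pvSplitlinesKeep body_text.toList).foldl
    (fun (acc : List (List Char) × Bool) line =>
      if PySem.Chars.startswith line [' '] then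
        if acc.2 then (acc.1 ++ [PySem.List.slice line (some 1) none], true)
        else (acc.1 ++ [pvOpenTag, PySem.List.slice line (some 1) none], true)
      else
        if acc.2 then (acc.1 ++ [pvCloseTag, line], false)
        else (acc.1 ++ [line], false))
    ([], false)
  String.ofList (PySem.Chars.join [] (if st.2 then st.1 ++ [pvCloseTag] else st.1))

-- ===== PORT B =====

-- B: split the lines into maximal runs of equal space-prefix flag and emit each run at once
def pvEmitGroups : List (List Char) → List (List Char)
  | [] => []
  | l :: ls =>
    let flag := PySem.Chars.startswith l [' ']
    let grp := l :: ls.takeWhile (fun x => PySem.Chars.startswith x [' '] == flag)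
    let rest := ls.dropWhile (fun x => PySem.Chars.startswith x [' '] == flag)
    (if flag then
       pvOpenTag :: grp.map (fun x => PySem.List.slice x (some 1) none) ++ [pvCloseTag]
     else grp) ++ pvEmitGroups rest
  termination_by ls => ls.length
  decreasing_by
    simp only [List.length_cons]
    exact Nat.lt_succ_of_le (List.length_dropWhile_le _ _)

def wrap_code_blocks_alt (body_text : String) : String :=
  String.ofList (PySem.Chars.join [] (pvEmitGroups (pvSplitlinesKeep body_text.toList)))

-- ===== PRECONDITION & SPEC =====
def Spec_wrap_code_blocks (body_text : String) (out : String) : Prop := out = wrap_code_blocks_alt body_text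
instance (body_text : String) (out : String) : Decidable (Spec_wrap_code_blocks body_text out) := by unfold Spec_wrap_code_blocks; infer_instance

-- ===== CLAIM (what is proved, stated in full; the proofs are below) =====
def Claim_equal_wrap_code_blocks : Prop := ∀ (body_text : String), Dom_wrap_code_blocks body_text → Spec_wrap_code_blocks body_text (wrap_code_blocks body_text)

-- ===== LEMMAS AND PROOFS =====

lemma pvEmit_cons_false (l : List Char) (ls : List (List Char))
    (hf : PySem.Chars.startswith l [' '] = false) :
    pvEmitGroups (l :: ls) = l :: pvEmitGroups ls := by
  cases ls with
  | nil => simp [pvEmitGroups, hf]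
  | cons l' ls'' =>
    by_cases h' : PySem.Chars.startswith l' [' '] = true
    · rw [pvEmitGroups]
      simp [hf, h']
    · have h'' : PySem.Chars.startswith l' [' '] = false := by simpa using h'
      rw [pvEmitGroups, pvEmitGroups]
      simp [hf, h'']

-- A's fold, rewritten as a structural state machine (proof device)
def pvMach : List (List Char) → Bool → List (List Char)
  | [], ic => if ic then [pvCloseTag] else []
  | l :: ls, ic =>
    if PySem.Chars.startswith l [' '] then
      (if ic then [PySem.List.slice l (some 1) none]
       else [pvOpenTag, PySem.List.slice l (some 1) none]) ++ pvMach ls true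
    else
      (if ic then [pvCloseTag, l] else [l]) ++ pvMach ls false

lemma pvFold_eq_mach (lines : List (List Char)) : ∀ (out : List (List Char)) (ic : Bool),
    (if (lines.foldl
          (fun (acc : List (List Char) × Bool) line =>
            if PySem.Chars.startswith line [' '] then
              if acc.2 then (acc.1 ++ [PySem.List.slice line (some 1) none], true)
              else (acc.1 ++ [pvOpenTag, PySem.List.slice line (some 1) none], true)
            else
              if acc.2 then (acc.1 ++ [pvCloseTag, line], false)
              else (acc.1 ++ [line], false)) (out, ic)).2 then
      (lines.foldl
          (fun (acc : List (List Char) × Bool) line =>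
            if PySem.Chars.startswith line [' '] then
              if acc.2 then (acc.1 ++ [PySem.List.slice line (some 1) none], true)
              else (acc.1 ++ [pvOpenTag, PySem.List.slice line (some 1) none], true)
            else
              if acc.2 then (acc.1 ++ [pvCloseTag, line], false)
              else (acc.1 ++ [line], false)) (out, ic)).1 ++ [pvCloseTag]
     else (lines.foldl
          (fun (acc : List (List Char) × Bool) line =>
            if PySem.Chars.startswith line [' '] then
              if acc.2 then (acc.1 ++ [PySem.List.slice line (some 1) none], true)
              else (acc.1 ++ [pvOpenTag, PySem.List.slice line (some 1) none], true)
            else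
              if acc.2 then (acc.1 ++ [pvCloseTag, line], false)
              else (acc.1 ++ [line], false)) (out, ic)).1) = out ++ pvMach lines ic := by
  induction lines with
  | nil => intro out ic; cases ic <;> simp [pvMach]
  | cons l ls ih =>
    intro out ic
    simp only [List.foldl_cons, pvMach]
    by_cases h : PySem.Chars.startswith l [' '] = true
    · cases ic <;> simp [h, ih]
    · cases ic <;> simp [h, ih]

lemma pvMach_eq (n : Nat) : ∀ (ls : List (List Char)), ls.length ≤ n →
    pvMach ls false = pvEmitGroups ls ∧
    pvMach ls true =
      (ls.takeWhile (fun x => PySem.Chars.startswith x [' '])).map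
          (fun x => PySem.List.slice x (some 1) none)
        ++ pvCloseTag :: pvEmitGroups (ls.dropWhile (fun x => PySem.Chars.startswith x [' '])) := by
  induction n with
  | zero =>
    intro ls h
    have : ls = [] := List.eq_nil_of_length_eq_zero (Nat.le_zero.mp h)
    subst this; simp [pvMach, pvEmitGroups]
  | succ n ih =>
    intro ls h
    cases ls with
    | nil => simp [pvMach, pvEmitGroups]
    | cons l ls' =>
      have hlen : ls'.length ≤ n := by simpa using h
      have hdrop : ∀ (p : List Char → Bool), (ls'.dropWhile p).length ≤ n :=
        fun p => le_trans (List.length_dropWhile_le p ls') hlen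
      by_cases hf : PySem.Chars.startswith l [' '] = true
      · constructor
        · rw [pvEmitGroups]
          simp only [hf, if_pos]
          have := (ih _ (hdrop (fun x => PySem.Chars.startswith x [' ']))).1
          have h2 := (ih ls' hlen).2
          simp [pvMach, hf, h2]
        · simp only [pvMach, hf, if_pos, List.takeWhile_cons, List.dropWhile_cons]
          have h2 := (ih ls' hlen).2
          simp [h2]
      · have hf' : PySem.Chars.startswith l [' '] = false := by
          simpa using hf
        constructor
        · have h1 := (ih ls' hlen).1
          rw [pvEmit_cons_false l ls' hf']
          simp [pvMach, hf', h1]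
        · simp only [pvMach, hf', List.takeWhile_cons, List.dropWhile_cons]
          have h1 := (ih ls' hlen).1
          simp [h1, pvEmit_cons_false l ls' hf']

-- ===== VERDICT (by name: the statement is the Claim_ definition above) =====
theorem wrap_code_blocks_spec : Claim_equal_wrap_code_blocks := by
  intro body_text _
  unfold Spec_wrap_code_blocks
  simp only [wrap_code_blocks, wrap_code_blocks_alt]
  rw [pvFold_eq_mach (pvSplitlinesKeep body_text.toList) [] false,
    (pvMach_eq (pvSplitlinesKeep body_text.toList).length _ le_rfl).1]
  simp
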